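-- pv_equiv track=rewrite | github.com/JoonSimJoon/algorithm_study | codejamC.py | Query
-- ===== SOURCE A (Python) =====
-- def Query(N,P):
--     l = []
--     if P<N-1 :
--         return []
--     T = 0
--     C = 1
--     for i in range (N-1, 0,-1):
--         C+=1
--         if T+C+i-1>=P :
--             R= P - T - i + 1
--             l.append(R)
--             for k  in range(i-1):
--                 l.append(1)
--             T=P
--             break
--         T+=C
--         l.append(C)
--     if T<P :
--         return []
--     return l
-- ===== SOURCE B (Python) =====
-- def Query(N, P):
--     # Closed-form construction: binary-search the break value C, then build
--     # [2..C-1] + [R] + ones directly instead of simulating A's accumulation loop.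
--     if P < N - 1:
--         return []
--     M = P - N + 1
--     lo, hi = 2, N + 1
--     while lo < hi:
--         mid = (lo + hi) // 2
--         if mid * (mid - 1) // 2 >= M:
--             hi = mid
--         else:
--             lo = mid + 1
--     C = lo
--     if C > N:
--         return []
--     return list(range(2, C)) + [P - C * (C - 1) // 2 - N + C + 1] + [1] * (N - C)
-- ===== Notes on version B (the rewrite author's own statement) =====
-- stated objective: alternative
-- what changed: Replaces A's linear accumulation loop (which sums 2,3,... until the break condition fires) by an O(log N) binary search for the break value C using the closed form C*(C-1)//2, then builds the result list [2..C-1]+[R]+[1]*(N-C) directly instead of appending element by element.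
import Mathlib
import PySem

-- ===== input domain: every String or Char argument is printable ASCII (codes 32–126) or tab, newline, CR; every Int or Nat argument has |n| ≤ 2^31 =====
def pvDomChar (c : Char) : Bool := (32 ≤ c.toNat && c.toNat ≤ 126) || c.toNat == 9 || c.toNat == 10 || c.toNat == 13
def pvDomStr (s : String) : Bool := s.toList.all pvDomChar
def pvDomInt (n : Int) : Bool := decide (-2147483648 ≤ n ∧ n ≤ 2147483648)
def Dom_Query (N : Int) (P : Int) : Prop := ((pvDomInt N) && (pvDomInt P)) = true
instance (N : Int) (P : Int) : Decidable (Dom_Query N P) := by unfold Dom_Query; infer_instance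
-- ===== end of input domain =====

-- B replaces A's linear accumulation loop by a binary search for the break value C
-- plus a closed-form construction of the result list (objective: alternative).

-- ===== PORT A =====
def queryLoopA (P : Int) : List Int → List Int → Int → Int → (List Int × Int)
  | [], l, T, _C => (l, T)
  | i :: rest, l, T, C =>
    if T + (C + 1) + i - 1 ≥ P then
      ((PySem.List.pyRange 0 (i - 1) 1).foldl (fun acc _ => acc ++ [1]) (l ++ [P - T - i + 1]), P)
    else queryLoopA P rest (l ++ [C + 1]) (T + (C + 1)) (C + 1)

def Query (N : Int) (P : Int) : List Int :=
  if P < N - 1 then []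
  else
    let r := queryLoopA P (PySem.List.pyRange (N - 1) 0 (-1)) [] 0 1
    if r.2 < P then [] else r.1

-- ===== PORT B =====
-- while lo < hi: binary search; fuel (N-1).toNat bounds the iteration count (totality guard only)
def bsearchB (M : Int) : Nat → Int → Int → Int
  | 0, lo, _hi => lo
  | Nat.succ fuel, lo, hi =>
    if lo < hi then
      if PySem.Int.floordiv ((PySem.Int.floordiv (lo + hi) 2) * ((PySem.Int.floordiv (lo + hi) 2) - 1)) 2 ≥ M then
        bsearchB M fuel lo (PySem.Int.floordiv (lo + hi) 2)
      else bsearchB M fuel ((PySem.Int.floordiv (lo + hi) 2) + 1) hi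
    else lo

def Query_alt (N : Int) (P : Int) : List Int :=
  if P < N - 1 then []
  else
    let C := bsearchB (P - N + 1) (N - 1).toNat 2 (N + 1)
    if C > N then []
    else PySem.List.pyRange 2 C 1 ++ [P - PySem.Int.floordiv (C * (C - 1)) 2 - N + C + 1]
           ++ PySem.List.pyRepeat [1] (N - C)

-- ===== PRECONDITION & SPEC =====
def Spec_Query (N : Int) (P : Int) (out : List Int) : Prop := out = Query_alt N P
instance (N : Int) (P : Int) (out : List Int) : Decidable (Spec_Query N P out) := by unfold Spec_Query; infer_instance

-- ===== CLAIM (what is proved, stated in full; the proofs are below) =====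
def Claim_equal_Query : Prop := ∀ (N : Int) (P : Int), Dom_Query N P → Spec_Query N P (Query N P)

-- ===== LEMMAS AND PROOFS =====

/-- the triangular value A accumulates: `tri c = c*(c-1)//2`. -/
def tri (c : Int) : Int := PySem.Int.floordiv (c * (c - 1)) 2

theorem tri_eq (c k : Int) (h : c * (c - 1) = 2 * k) : tri c = k := by
  unfold tri
  rw [h, PySem.Int.floordiv_eq_iff_of_pos (by omega)]
  omega

theorem tri_double (c : Int) : c * (c - 1) = 2 * tri c := by
  have h : Even ((c - 1) * (c - 1 + 1)) := Int.even_mul_succ_self (c - 1)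
  obtain ⟨k, hk⟩ := h
  have h2 : c * (c - 1) = 2 * k := by nlinarith
  rw [tri_eq c k h2]; exact h2

theorem tri_succ (c : Int) : tri (c + 1) = tri c + c := by
  have h1 := tri_double c
  have h2 := tri_double (c + 1)
  nlinarith

theorem tri_mono {a b : Int} (h1 : 1 ≤ a) (h2 : a ≤ b) : tri a ≤ tri b := by
  have ha := tri_double a
  have hb := tri_double b
  nlinarith

theorem tri_two : tri 2 = 1 := by decide

theorem ones_foldl (L : List Int) (l : List Int) :
    L.foldl (fun acc _ => acc ++ [(1 : Int)]) l = l ++ L.map (fun _ => (1 : Int)) := by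
  induction L generalizing l with
  | nil => simp
  | cons x xs ih => simp [List.foldl_cons, ih]

theorem ones_range (n : Int) :
    (PySem.List.pyRange 0 n 1).map (fun _ => (1 : Int)) = List.replicate n.toNat (1 : Int) := by
  rw [PySem.List.pyRange_one]
  simp [Function.comp_def, List.map_const']

/-- A's loop when the break fires at value `m` (with `c + n` the conserved sum). -/
theorem loopA_hit (P : Int) :
    ∀ (n : Nat) (c m : Int) (l : List Int), 2 ≤ c → c ≤ m → m < c + (n : Int) →
    P + 2 ≤ tri m + (c + (n : Int)) →
    (∀ c', c ≤ c' → c' < m → tri c' + (c + (n : Int)) < P + 2) →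
    queryLoopA P (PySem.List.pyRange (n : Int) 0 (-1)) l (tri c - 1) (c - 1) =
      (l ++ PySem.List.pyRange c m 1 ++ [P - tri m - (c + (n : Int)) + m + 2]
         ++ List.replicate (c + (n : Int) - m - 1).toNat (1 : Int), P) := by
  intro n
  induction n with
  | zero => intro c m l hc hcm hm _ _; omega
  | succ n ih =>
    intro c m l hc hcm hm hpred hmin
    rw [show ((n + 1 : Nat) : Int) = (n : Int) + 1 by push_cast; ring] at *
    rw [PySem.List.pyRange_neg_one_cons (by omega : (0:Int) < (n : Int) + 1)]
    by_cases hbr : m = c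
    · -- break now
      subst hbr
      rw [queryLoopA, if_pos (by omega)]
      rw [ones_foldl, ones_range]
      rw [PySem.List.pyRange_one_eq_nil (le_refl m)]
      rw [show P - (tri m - 1) - ((n : Int) + 1) + 1
            = P - tri m - (m + ((n : Int) + 1)) + m + 2 by ring]
      rw [show ((n : Int) + 1 - 1) = (m + ((n : Int) + 1) - m - 1) by ring]
      simp
    · -- no break: recurse
      have hlt : c < m := lt_of_le_of_ne hcm (Ne.symm hbr)
      have hcond : ¬ (tri c - 1 + (c - 1 + 1) + ((n : Int) + 1) - 1 ≥ P) := by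
        have := hmin c (le_refl c) hlt
        omega
      rw [queryLoopA, if_neg hcond]
      simp only [show c - 1 + 1 = c from by ring]
      have h := ih (c + 1) m (l ++ [c]) (by omega) (by omega) (by omega)
        (by omega) (fun c' h1 h2 => by have := hmin c' (by omega) h2; omega)
      simp only [add_sub_cancel_right] at h
      rw [show tri c - 1 + c = tri (c + 1) - 1 from by have := tri_succ c; omega]
      simp only [add_sub_cancel_right]
      rw [h]
      rw [show P - tri m - (c + 1 + (n : Int)) + m + 2
            = P - tri m - (c + ((n : Int) + 1)) + m + 2 by ring]
      rw [show c + 1 + (n : Int) - m - 1 = c + ((n : Int) + 1) - m - 1 by ring]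
      rw [PySem.List.pyRange_one_cons hlt]
      simp [List.append_assoc]

/-- A's loop when the break never fires. -/
theorem loopA_miss (P : Int) :
    ∀ (n : Nat) (c : Int) (l : List Int), 2 ≤ c →
    (∀ c', c ≤ c' → c' < c + (n : Int) → tri c' + (c + (n : Int)) < P + 2) →
    queryLoopA P (PySem.List.pyRange (n : Int) 0 (-1)) l (tri c - 1) (c - 1) =
      (l ++ PySem.List.pyRange c (c + (n : Int)) 1, tri (c + (n : Int)) - 1) := by
  intro n
  induction n with
  | zero =>
    intro c l hc _
    simp only [Nat.cast_zero, add_zero]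
    rw [PySem.List.pyRange_neg_one_eq_nil (le_refl 0), PySem.List.pyRange_one_eq_nil (le_refl c)]
    simp [queryLoopA]
  | succ n ih =>
    intro c l hc hmin
    rw [show ((n + 1 : Nat) : Int) = (n : Int) + 1 by push_cast; ring] at *
    rw [PySem.List.pyRange_neg_one_cons (by omega : (0:Int) < (n : Int) + 1)]
    have hcond : ¬ (tri c - 1 + (c - 1 + 1) + ((n : Int) + 1) - 1 ≥ P) := by
      have := hmin c (le_refl c) (by omega)
      omega
    rw [queryLoopA, if_neg hcond]
    simp only [show c - 1 + 1 = c from by ring]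
    have h := ih (c + 1) (l ++ [c]) (by omega)
      (fun c' h1 h2 => by have := hmin c' (by omega) (by omega); omega)
    simp only [add_sub_cancel_right] at h
    rw [show tri c - 1 + c = tri (c + 1) - 1 from by have := tri_succ c; omega]
    simp only [add_sub_cancel_right]
    rw [h]
    rw [show c + 1 + (n : Int) = c + ((n : Int) + 1) by ring]
    rw [PySem.List.pyRange_one_cons (by omega : c < c + ((n : Int) + 1))]
    simp [List.append_assoc]

/-- binary-search invariant: the result is the least `C ≥ 2` with `tri C ≥ M` (or `H0`). -/
theorem bsearchB_spec (M : Int) :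
    ∀ (fuel : Nat) (lo hi H0 : Int), 2 ≤ lo → lo ≤ hi → hi ≤ H0 →
    (hi - lo).toNat ≤ fuel →
    (∀ c, 2 ≤ c → c < lo → tri c < M) →
    (hi < H0 → M ≤ tri hi) →
    2 ≤ bsearchB M fuel lo hi ∧ bsearchB M fuel lo hi ≤ hi ∧
    (∀ c, 2 ≤ c → c < bsearchB M fuel lo hi → tri c < M) ∧
    (bsearchB M fuel lo hi < H0 → M ≤ tri (bsearchB M fuel lo hi)) := by
  intro fuel
  induction fuel with
  | zero =>
    intro lo hi H0 h2 hlh hhH hfuel hbelow habove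
    have : hi = lo := by omega
    subst this
    simp only [bsearchB]
    exact ⟨h2, le_refl _, hbelow, habove⟩
  | succ fuel ih =>
    intro lo hi H0 h2 hlh hhH hfuel hbelow habove
    by_cases hlt : lo < hi
    · have hmid1 : lo ≤ PySem.Int.floordiv (lo + hi) 2 := by
        rw [PySem.Int.le_floordiv_iff_mul_le (by omega)]; omega
      have hmid2 : PySem.Int.floordiv (lo + hi) 2 < hi := by
        rw [PySem.Int.floordiv_lt_iff_lt_mul (by omega)]; omega
      rw [bsearchB, if_pos hlt]
      by_cases hp : PySem.Int.floordiv ((PySem.Int.floordiv (lo + hi) 2) * ((PySem.Int.floordiv (lo + hi) 2) - 1)) 2 ≥ M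
      · rw [if_pos hp]
        have := ih lo (PySem.Int.floordiv (lo + hi) 2) H0 h2 hmid1 (by omega) (by omega)
          hbelow (fun _ => hp)
        exact ⟨this.1, by omega, this.2.2.1, this.2.2.2⟩
      · rw [if_neg hp]
        have hnot : tri (PySem.Int.floordiv (lo + hi) 2) < M := by
          unfold tri; omega
        have := ih ((PySem.Int.floordiv (lo + hi) 2) + 1) hi H0 (by omega) (by omega) hhH (by omega)
          (by intro c hc1 hc2
              by_cases hcl : c < lo
              · exact hbelow c hc1 hcl
              · exact lt_of_le_of_lt (tri_mono (by omega) (by omega)) hnot)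
          habove
        exact this
    · have : hi = lo := by omega
      subst this
      rw [bsearchB, if_neg hlt]
      exact ⟨h2, le_refl _, hbelow, habove⟩

theorem Query_main (N P : Int) : Query N P = Query_alt N P := by
  unfold Query Query_alt
  by_cases h1 : P < N - 1
  · simp [h1]
  · simp only [if_neg h1]
    by_cases h2 : N ≤ 1
    · -- degenerate: A's loop range is empty, B's search has fuel 0
      rw [PySem.List.pyRange_neg_one_eq_nil (by omega : N - 1 ≤ 0)]
      rw [show (N - 1).toNat = 0 from by omega]
      simp only [queryLoopA, bsearchB]
      rw [if_pos (by omega : (2:Int) > N)]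
      by_cases h3 : (0:Int) < P <;> simp [h3]
    · -- N ≥ 2
      have hn : (((N - 1).toNat : Nat) : Int) = N - 1 := by omega
      obtain ⟨hr2, hrle, hbelow, habove⟩ := bsearchB_spec (P - N + 1) (N - 1).toNat 2 (N + 1) (N + 1)
        (le_refl 2) (by omega) (le_refl _) (by omega)
        (by intro c hc1 hc2; omega) (by intro h; omega)
      set r := bsearchB (P - N + 1) (N - 1).toNat 2 (N + 1) with hr
      by_cases hCN : r > N
      · -- no break value ≤ N: both return []
        have hreq : r = N + 1 := by omega
        rw [hreq] at hbelow
        have hA := loopA_miss P ((N - 1).toNat) 2 []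
          (le_refl 2)
          (by intro c' hc1 hc2; have := hbelow c' hc1 (by omega); omega)
        rw [hn, tri_two] at hA
        simp only [show (1:Int) - 1 = 0 from rfl, show (2:Int) - 1 = 1 from rfl,
          List.nil_append] at hA
        rw [hA]
        have hTP : tri (2 + (N - 1)) - 1 < P := by
          have h1 := hbelow N (by omega) (by omega)
          have h2 := tri_succ N
          rw [show (2 : Int) + (N - 1) = N + 1 by ring]
          omega
        simp [hTP, hCN]
      · -- break at C = r ≤ N
        have hpred := habove (by omega)
        have hA := loopA_hit P ((N - 1).toNat) 2 r []
          (le_refl 2) hr2 (by omega)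
          (by omega)
          (by intro c' hc1 hc2; have := hbelow c' hc1 hc2; omega)
        rw [hn, tri_two] at hA
        simp only [show (1:Int) - 1 = 0 from rfl, show (2:Int) - 1 = 1 from rfl,
          List.nil_append] at hA
        rw [hA]
        rw [show PySem.Int.floordiv (r * (r - 1)) 2 = tri r from rfl,
          PySem.List.pyRepeat_singleton]
        have e1 : P - tri r - (2 + (N - 1)) + r + 2 = P - tri r - N + r + 1 := by ring
        have e2 : 2 + (N - 1) - r - 1 = N - r := by ring
        simp [hCN, e1, e2, List.append_assoc]

-- ===== VERDICT (by name: the statement is the Claim_ definition above) =====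
theorem Query_spec : Claim_equal_Query := by
  intro N P _dom
  unfold Spec_Query
  exact Query_main N P
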